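-- pv_equiv track=rewrite | github.com/avagyanie/PYTHON_COURSE | Week8/Week8_1/Homework_9.py | solution
-- ===== SOURCE A (Python) =====
-- def solution(matrix):
--     total = 0
--     j_columns = set()
--     for index, i in enumerate(matrix):
--         for jindex, j in enumerate(i):
--
--             if j == 0:
--                 j_columns.add(jindex)
--                 continue
--             if index > 0 and jindex in j_columns:
--                 continue
--
--             total += j
--
--     return total
-- ===== SOURCE B (Python) =====
-- def solution(matrix):
--     width = 0
--     for row in matrix:
--         if len(row) > width:
--             width = len(row)
--     total = 0
--     for c in range(width):
--         for row in matrix: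
--             if c < len(row):
--                 v = row[c]
--                 if v == 0:
--                     break
--                 total += v
--     return total
-- ===== Notes on version B (the rewrite author's own statement) =====
-- stated objective: alternative
-- what changed: Row-major scan with a persistent dead-column set replaced by a column-major scan that breaks at each column's first zero, so no set is maintained at all.
import Mathlib
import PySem

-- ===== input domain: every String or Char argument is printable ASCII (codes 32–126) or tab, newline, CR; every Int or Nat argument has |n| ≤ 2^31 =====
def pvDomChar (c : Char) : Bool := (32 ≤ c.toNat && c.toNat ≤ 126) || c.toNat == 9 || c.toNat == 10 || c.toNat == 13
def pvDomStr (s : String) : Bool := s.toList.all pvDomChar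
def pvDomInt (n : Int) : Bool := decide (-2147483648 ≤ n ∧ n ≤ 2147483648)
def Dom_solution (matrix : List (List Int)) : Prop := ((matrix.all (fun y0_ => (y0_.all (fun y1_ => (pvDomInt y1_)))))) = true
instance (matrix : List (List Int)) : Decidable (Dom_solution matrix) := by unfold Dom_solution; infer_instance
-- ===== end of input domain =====

-- B replaces A's row-major scan with a dead-column set by a column-major scan that
-- breaks at each column's first zero; same cost, no set maintained (objective: alternative).

-- ===== PORT A =====
def solution (matrix : List (List Int)) : Int :=
  ((PySem.List.enumerate matrix).foldl
    (fun (st : Int × PySem.Set Int) (p : Int × List Int) =>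
      (PySem.List.enumerate p.2).foldl
        (fun (st : Int × PySem.Set Int) (q : Int × Int) =>
          if q.2 = 0 then (st.1, PySem.Set.add st.2 q.1)
          else if 0 < p.1 ∧ PySem.Set.contains st.2 q.1 = true then st
          else (st.1 + q.2, st.2))
        st)
    ((0 : Int), (PySem.Set.empty : PySem.Set Int))).1

-- ===== PORT B =====
-- inner loop of Source B: walk the rows of one column, break at the first zero
def colSum (rows : List (List Int)) (c : Int) : Int :=
  match rows with
  | [] => 0
  | r :: rs =>
    if c < (r.length : Int) then
      match PySem.List.pyGet? r c with
      | some v => if v = 0 then 0 else v + colSum rs c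
      | none => colSum rs c
    else colSum rs c

def solution_alt (matrix : List (List Int)) : Int :=
  let width : Int := matrix.foldl (fun w r => if (r.length : Int) > w then (r.length : Int) else w) 0
  (PySem.List.pyRange 0 width 1).foldl (fun t c => t + colSum matrix c) 0

-- ===== PRECONDITION & SPEC =====
def Spec_solution (matrix : List (List Int)) (out : Int) : Prop := out = solution_alt matrix
instance (matrix : List (List Int)) (out : Int) : Decidable (Spec_solution matrix out) := by unfold Spec_solution; infer_instance

-- ===== CLAIM (what is proved, stated in full; the proofs are below) =====
def Claim_equal_solution : Prop := ∀ (matrix : List (List Int)), Dom_solution matrix → Spec_solution matrix (solution matrix)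

-- ===== LEMMAS AND PROOFS =====

-- row contribution with blocked-column predicate P, column indices starting at k
def rowAddP (P : Int → Bool) : Int → List Int → Int
  | _, [] => 0
  | k, v :: vs => (if v ≠ 0 ∧ P k = false then v else 0) + rowAddP P (k + 1) vs

-- the dead-column set after scanning one row, column indices starting at k
def zset : Int → PySem.Set Int → List Int → PySem.Set Int
  | _, S, [] => S
  | k, S, v :: vs => zset (k + 1) (if v = 0 then PySem.Set.add S k else S) vs

def zAll : List (List Int) → PySem.Set Int → PySem.Set Int
  | [], S => S
  | r :: rs, S => zAll rs (zset 0 S r)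

-- row-major specification of A: process rows in order, threading the dead set
def fA : List (List Int) → PySem.Set Int → Int
  | [], _ => 0
  | r :: rs, S => rowAddP (fun c => PySem.Set.contains S c) 0 r + fA rs (zset 0 S r)

def maxN : List (List Int) → Nat
  | [] => 0
  | r :: rs => max r.length (maxN rs)

-- per-column value blocked by set S
def colS (rows : List (List Int)) (c : Int) (S : PySem.Set Int) : Int :=
  if PySem.Set.contains S c then 0 else colSum rows c

def rTerm (r : List Int) (P : Int → Bool) (k : Int) (c : Nat) : Int :=
  match r[c]? with
  | some v => if v ≠ 0 ∧ P (k + c) = false then v else 0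
  | none => 0

theorem rowAddP_congr (P Q : Int → Bool) (k : Int) (r : List Int)
    (h : ∀ c, k ≤ c → P c = Q c) : rowAddP P k r = rowAddP Q k r := by
  induction r generalizing k with
  | nil => rfl
  | cons v vs ih =>
    simp only [rowAddP, h k (le_refl k), ih (k + 1) (fun c hc => h c (by omega))]

theorem contains_add_of_ne (S : PySem.Set Int) (a c : Int) (h : c ≠ a) :
    PySem.Set.contains (PySem.Set.add S a) c = PySem.Set.contains S c := by
  by_cases hm : a ∈ S
  · rw [PySem.Set.add_of_mem hm]
  · rw [PySem.Set.add_of_not_mem hm]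
    simp [h]

theorem inner_fold (i : Int) (r : List Int) (k t : Int) (S : PySem.Set Int) :
    (PySem.List.enumerate r k).foldl
      (fun (st : Int × PySem.Set Int) (q : Int × Int) =>
        if q.2 = 0 then (st.1, PySem.Set.add st.2 q.1)
        else if 0 < i ∧ PySem.Set.contains st.2 q.1 = true then st
        else (st.1 + q.2, st.2)) (t, S)
    = (t + rowAddP (fun c => decide (0 < i) && PySem.Set.contains S c) k r, zset k S r) := by
  induction r generalizing k t S with
  | nil => simp [PySem.List.enumerate_nil, rowAddP, zset]
  | cons v vs ih =>
    rw [PySem.List.enumerate_cons, List.foldl_cons]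
    by_cases hv : v = 0
    · subst hv
      rw [if_pos (show ((k, (0:Int)).2 = 0) from rfl)]
      simp only [ih]
      rw [rowAddP_congr (fun c => decide (0 < i) && PySem.Set.contains (PySem.Set.add S k) c)
          (fun c => decide (0 < i) && PySem.Set.contains S c) (k + 1) vs
          (fun c hc => by simp only [contains_add_of_ne S k c (by omega)])]
      simp [rowAddP, zset]
    · rw [if_neg (show ¬ ((k, v).2 = 0) from hv)]
      by_cases hb : 0 < i ∧ PySem.Set.contains S k = true
      · rw [if_pos (show (0 < i ∧ PySem.Set.contains (t, S).2 (k, v).1 = true) from hb)]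
        simp only [ih]
        simp only [rowAddP, zset, if_neg hv]
        have h0 : (if v ≠ 0 ∧ (decide (0 < i) && PySem.Set.contains S k) = false then v else 0) = 0 := by
          rw [if_neg]
          rintro ⟨-, hfalse⟩
          rw [hb.2, Bool.and_true] at hfalse
          simp [hb.1] at hfalse
        rw [h0, zero_add]
      · have hPk : (decide (0 < i) && PySem.Set.contains S k) = false := by
          by_cases hi : 0 < i
          · cases hSk : PySem.Set.contains S k
            · simp
            · exact absurd ⟨hi, hSk⟩ hb
          · simp [hi]
        rw [if_neg (show ¬ (0 < i ∧ PySem.Set.contains (t, S).2 (k, v).1 = true) from hb)]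
        simp only [ih]
        simp only [rowAddP, zset, if_neg hv]
        rw [if_pos ⟨hv, hPk⟩]
        refine Prod.ext ?_ rfl
        simp [add_assoc]

theorem outer_fold (rows : List (List Int)) (i t : Int) (S : PySem.Set Int) (hi : 1 ≤ i) :
    ((PySem.List.enumerate rows i).foldl
      (fun (st : Int × PySem.Set Int) (p : Int × List Int) =>
        (PySem.List.enumerate p.2).foldl
          (fun (st : Int × PySem.Set Int) (q : Int × Int) =>
            if q.2 = 0 then (st.1, PySem.Set.add st.2 q.1)
            else if 0 < p.1 ∧ PySem.Set.contains st.2 q.1 = true then st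
            else (st.1 + q.2, st.2))
          st)
      (t, S))
    = (t + fA rows S, zAll rows S) := by
  induction rows generalizing i t S with
  | nil => simp [PySem.List.enumerate_nil, fA, zAll]
  | cons r rs ih =>
    rw [PySem.List.enumerate_cons, List.foldl_cons]
    simp only [inner_fold]
    rw [ih (i + 1) _ _ (by omega)]
    simp only [fA, zAll]
    have hd : decide (0 < i) = true := by simp; omega
    rw [rowAddP_congr (fun c => decide (0 < i) && PySem.Set.contains S c)
          (fun c => PySem.Set.contains S c) 0 r (fun c _ => by simp [hd])]
    refine Prod.ext ?_ rfl
    simp [add_assoc]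

theorem solution_eq_fA (matrix : List (List Int)) :
    solution matrix = fA matrix PySem.Set.empty := by
  cases matrix with
  | nil => simp [solution, PySem.List.enumerate_nil, fA]
  | cons r rs =>
    unfold solution
    rw [PySem.List.enumerate_cons, List.foldl_cons]
    simp only [inner_fold]
    rw [outer_fold rs (0 + 1) _ _ (by omega)]
    simp only [fA]
    rw [rowAddP_congr (fun c => decide ((0:Int) < 0) && PySem.Set.contains PySem.Set.empty c)
          (fun c => PySem.Set.contains PySem.Set.empty c) 0 r (fun c _ => by simp)]
    simp

-- ---- characterisation of B ----

theorem width_fold (rows : List (List Int)) (a : Int) (ha : 0 ≤ a) :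
    rows.foldl (fun w r => if (r.length : Int) > w then (r.length : Int) else w) a
      = max a (maxN rows : Int) := by
  induction rows generalizing a with
  | nil =>
    simp only [List.foldl_nil, maxN]
    omega
  | cons r rs ih =>
    simp only [List.foldl_cons, maxN]
    have hstep : (if (r.length : Int) > a then (r.length : Int) else a) = max a (r.length : Int) := by
      split <;> omega
    rw [hstep, ih _ (by omega)]
    push_cast [Nat.cast_max]
    omega

theorem foldl_pyRange_sum (g : Int → Int) (n : Nat) (t : Int) :
    (PySem.List.pyRange 0 (n : Int) 1).foldl (fun t c => t + g c) t
      = t + ∑ c ∈ Finset.range n, g (c : Int) := by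
  induction n generalizing t with
  | zero => simp [PySem.List.pyRange_one_eq_nil]
  | succ m ih =>
    have hcast : ((m + 1 : Nat) : Int) = (m : Int) + 1 := by push_cast; ring
    rw [hcast, PySem.List.pyRange_one_succ_right (by positivity), List.foldl_append]
    rw [ih, Finset.sum_range_succ]
    simp [add_assoc]

theorem solution_alt_eq (matrix : List (List Int)) :
    solution_alt matrix = ∑ c ∈ Finset.range (maxN matrix), colSum matrix (c : Int) := by
  unfold solution_alt
  rw [width_fold matrix 0 (le_refl 0)]
  have : max (0 : Int) (maxN matrix : Int) = ((maxN matrix : Nat) : Int) :=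
    max_eq_right (Int.natCast_nonneg _)
  rw [this, foldl_pyRange_sum, zero_add]

-- ---- rows-to-columns exchange ----

theorem rTerm_zero_of_ge (r : List Int) (P : Int → Bool) (k : Int) (c : Nat)
    (h : r.length ≤ c) : rTerm r P k c = 0 := by
  simp [rTerm, List.getElem?_eq_none h]

theorem rowAddP_eq_sum (r : List Int) (P : Int → Bool) (k : Int) :
    rowAddP P k r = ∑ c ∈ Finset.range r.length, rTerm r P k c := by
  induction r generalizing k with
  | nil => simp [rowAddP]
  | cons v vs ih =>
    simp only [rowAddP, List.length_cons]
    rw [Finset.sum_range_succ', ih (k + 1)]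
    have h0 : rTerm (v :: vs) P k 0 = (if v ≠ 0 ∧ P k = false then v else 0) := by
      simp [rTerm]
    have hs : ∀ c ∈ Finset.range vs.length, rTerm (v :: vs) P k (c + 1) = rTerm vs P (k + 1) c := by
      intro c _
      have hk : k + ((c : Int) + 1) = k + 1 + (c : Int) := by ring
      simp [rTerm, hk]
    rw [Finset.sum_congr rfl hs, h0]
    ring

theorem rowAddP_eq_sum_pad (r : List Int) (P : Int → Bool) (n : Nat) (hn : r.length ≤ n) :
    rowAddP P 0 r = ∑ c ∈ Finset.range n, rTerm r P 0 c := by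
  rw [rowAddP_eq_sum]
  refine Finset.sum_subset ?_ ?_
  · intro x hx
    simp only [Finset.mem_range] at hx ⊢
    omega
  · intro c _ hc
    simp only [Finset.mem_range, not_lt] at hc
    exact rTerm_zero_of_ge r P 0 c hc

theorem mem_zset (r : List Int) (k : Int) (S : PySem.Set Int) (j : Int) :
    PySem.Set.contains (zset k S r) j = true ↔
      (PySem.Set.contains S j = true ∨ ∃ c : Nat, c < r.length ∧ j = k + (c : Int) ∧ r[c]? = some (0 : Int)) := by
  induction r generalizing k S with
  | nil => simp [zset]
  | cons v vs ih =>
    simp only [zset]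
    rw [ih]
    by_cases hv : v = 0
    · subst hv
      rw [show (if (0 : Int) = 0 then PySem.Set.add S k else S) = PySem.Set.add S k from if_pos rfl]
      constructor
      · rintro (h | ⟨c, hc, hj, hget⟩)
        · rw [PySem.Set.contains_iff, PySem.Set.mem_add] at h
          rcases h with h | h
          · exact Or.inl (by rw [PySem.Set.contains_iff]; exact h)
          · exact Or.inr ⟨0, by simp, by simpa using h, by simp⟩
        · exact Or.inr ⟨c + 1, by simpa using hc, by push_cast; omega, by simpa using hget⟩
      · rintro (h | ⟨c, hc, hj, hget⟩)
        · left
          rw [PySem.Set.contains_iff, PySem.Set.mem_add]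
          exact Or.inl ((PySem.Set.contains_iff _ _).mp h)
        · cases c with
          | zero =>
            left
            rw [PySem.Set.contains_iff, PySem.Set.mem_add]
            exact Or.inr (by simpa using hj)
          | succ c' =>
            exact Or.inr ⟨c', by simpa using hc, by push_cast at hj ⊢; omega, by simpa using hget⟩
    · simp only [if_neg hv]
      constructor
      · rintro (h | ⟨c, hc, hj, hget⟩)
        · exact Or.inl h
        · exact Or.inr ⟨c + 1, by simpa using hc, by push_cast; omega, by simpa using hget⟩
      · rintro (h | ⟨c, hc, hj, hget⟩)
        · exact Or.inl h
        · cases c with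
          | zero =>
            exfalso
            apply hv
            simpa using hget
          | succ c' =>
            exact Or.inr ⟨c', by simpa using hc, by push_cast at hj ⊢; omega, by simpa using hget⟩

theorem colSum_cons (r : List Int) (rs : List (List Int)) (c : Int) :
    colSum (r :: rs) c = if c < (r.length : Int) then
      (match PySem.List.pyGet? r c with
       | some v => if v = 0 then 0 else v + colSum rs c
       | none => colSum rs c)
    else colSum rs c := rfl

theorem pointwise (r : List Int) (rs : List (List Int)) (S : PySem.Set Int) (c : Nat) :
    rTerm r (fun x => PySem.Set.contains S x) 0 c + colS rs (c : Int) (zset 0 S r)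
      = colS (r :: rs) (c : Int) S := by
  unfold colS
  cases hS : PySem.Set.contains S (c : Int) with
  | true =>
    have hz : PySem.Set.contains (zset 0 S r) (c : Int) = true :=
      (mem_zset r 0 S (c : Int)).mpr (Or.inl hS)
    have ht : rTerm r (fun x => PySem.Set.contains S x) 0 c = 0 := by
      unfold rTerm
      cases h : r[c]? with
      | none => rfl
      | some v =>
        show (if v ≠ 0 ∧ (fun x => PySem.Set.contains S x) (0 + (c : Int)) = false then v else 0) = 0
        rw [if_neg]
        rintro ⟨-, hP⟩
        simp at hP
        exact hP ((PySem.Set.contains_iff _ _).mp hS)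
    rw [ht, hz]
    simp
  | false =>
    cases hg : r[c]? with
    | none =>
      have hlen : r.length ≤ c := by
        by_contra h
        push_neg at h
        simp [List.getElem?_eq_getElem h] at hg
      have hz : PySem.Set.contains (zset 0 S r) (c : Int) = false := by
        cases hzz : PySem.Set.contains (zset 0 S r) (c : Int)
        · rfl
        · rcases (mem_zset r 0 S (c : Int)).mp hzz with h | ⟨c', hc', hj, hget⟩
          · rw [h] at hS
            exact absurd hS (by simp)
          · have hcc : c' = c := by omega
            subst hcc
            omega
      rw [rTerm_zero_of_ge r _ 0 c hlen, hz, colSum_cons, if_neg (show ¬ ((c : Int) < (r.length : Int)) from by push_cast; omega)]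
      simp
    | some v =>
      have hlt : c < r.length := by
        by_contra h
        push_neg at h
        simp [List.getElem?_eq_none h] at hg
      have hpy : PySem.List.pyGet? r (c : Int) = some v := by
        rw [PySem.List.pyGet?_natCast, hg]
      by_cases hv : v = 0
      · subst hv
        have hz : PySem.Set.contains (zset 0 S r) (c : Int) = true :=
          (mem_zset r 0 S (c : Int)).mpr (Or.inr ⟨c, hlt, by ring, hg⟩)
        have ht : rTerm r (fun x => PySem.Set.contains S x) 0 c = 0 := by
          unfold rTerm
          rw [hg]
          simp
        rw [ht, hz, colSum_cons, if_pos (show ((c : Int) < (r.length : Int)) from by push_cast; omega), hpy]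
        simp
      · have hz : PySem.Set.contains (zset 0 S r) (c : Int) = false := by
          cases hzz : PySem.Set.contains (zset 0 S r) (c : Int)
          · rfl
          · rcases (mem_zset r 0 S (c : Int)).mp hzz with h | ⟨c', hc', hj, hget⟩
            · rw [h] at hS
              exact absurd hS (by simp)
            · have hcc : c' = c := by omega
              subst hcc
              rw [hg] at hget
              exact absurd (Option.some.inj hget) hv
        have ht : rTerm r (fun x => PySem.Set.contains S x) 0 c = v := by
          unfold rTerm
          rw [hg]
          show (if v ≠ 0 ∧ (fun x => PySem.Set.contains S x) (0 + (c : Int)) = false then v else 0) = v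
          rw [if_pos ⟨hv, by
            simp
            intro hmem
            have hct := (PySem.Set.contains_iff _ _).mpr hmem
            rw [hS] at hct
            exact Bool.noConfusion hct⟩]
        rw [ht, hz, colSum_cons, if_pos (show ((c : Int) < (r.length : Int)) from by push_cast; omega), hpy]
        simp [hv]

theorem fA_eq_sum (rows : List (List Int)) (S : PySem.Set Int) (n : Nat) (hn : maxN rows ≤ n) :
    fA rows S = ∑ c ∈ Finset.range n, colS rows (c : Int) S := by
  induction rows generalizing S n with
  | nil => simp [fA, colS, colSum]
  | cons r rs ih =>
    simp only [fA]
    have hlen : r.length ≤ n := by simp [maxN] at hn; omega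
    have hmx : maxN rs ≤ n := by simp [maxN] at hn; omega
    rw [rowAddP_eq_sum_pad r _ n hlen, ih (zset 0 S r) n hmx, ← Finset.sum_add_distrib]
    exact Finset.sum_congr rfl (fun c _ => pointwise r rs S c)

-- ===== VERDICT (by name: the statement is the Claim_ definition above) =====
theorem solution_spec : Claim_equal_solution := by
  intro matrix _
  unfold Spec_solution
  rw [solution_eq_fA, solution_alt_eq, fA_eq_sum matrix PySem.Set.empty (maxN matrix) le_rfl]
  exact (Finset.sum_congr rfl (fun c _ => by simp [colS])).symm
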